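/- GENERATED by farm/mkstatement.py from design/units.tsv (unit `start_decoder.C11c`) and the assertions of Vorbis/Spec/StartDecoderC11.lean — do not edit.
   THE STATEMENT of the proof unit `start_decoder.C11c`: segment C11c of `start_decoder` (25 instructions; entries 0x114c26;
   exits 0x114c6f,0x114d1a; ranges 0x114c26-0x114c6b + 0x114cfb-0x114d15)
   takes each of its entry assertions to one of its exit assertions (`Vorbis.Spec.StartDecoder.SegC11c`), given the contracts of its callees.
   What the names mean: Vorbis/Spec/Basic.lean (the shared hypotheses), Vorbis/Spec/StartDecoderC11.lean (the assertions). The theorem to prove: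
   `theorem start_decoder_C11c_ok : Vorbis.Spec.start_decoder_C11c.Statement`. -/
import Vorbis.Spec.Codebook
import Vorbis.Spec.StartDecoderC11
namespace Vorbis.Spec.start_decoder_C11c
open X86 X86.User Asan

/-- The statement of unit `start_decoder.C11c`. -/
def Statement : Prop :=
  ∀ (Lay : Layout) (_hLay : Lay.hi = 0x1000000) (μ : Microarch) (_hμ : UserX.MicroOK μ) (u₀ : State)
    (_hcode : HasCodeNat Lay u₀ Vorbis.L.start_decoder.entry Vorbis.Code.code_start_decoder.nat Vorbis.L.start_decoder.size)
    (_h_asan_store4_noabort : Asan.SmallCheck Lay μ Vorbis.WayInv (Vorbis.CodeOK u₀) [.rax, .rcx, .rdx] 4 Vorbis.L.__asan_store4_noabort.entry)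
    (_h_asan_store1_noabort : Asan.SmallCheck Lay μ Vorbis.WayInv (Vorbis.CodeOK u₀) [.rax, .rdx] 1 Vorbis.L.__asan_store1_noabort.entry)
    (_h_asan_load1_noabort : Asan.SmallCheck Lay μ Vorbis.WayInv (Vorbis.CodeOK u₀) [.rax, .rdx] 1 Vorbis.L.__asan_load1_noabort.entry)
    (_h_asan_load4_noabort : Asan.SmallCheck Lay μ Vorbis.WayInv (Vorbis.CodeOK u₀) [.rax, .rcx, .rdx] 4 Vorbis.L.__asan_load4_noabort.entry)
    (_h_lookup1_values : ∀ (others : List Obj) (frames : List (Nat × FrameLayout)), Calls Lay μ Vorbis.WayInv (Vorbis.conv u₀) Vorbis.L.lookup1_values.entry (Vorbis.Spec.lookup1_values.spec others frames)),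
    Vorbis.Spec.StartDecoder.SegC11c Lay μ u₀

end Vorbis.Spec.start_decoder_C11c
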